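-- pv_equiv track=rewrite | github.com/Aleksandr-biochem/EpitopeScan | utils.py | CheckFrameDisruption
-- ===== SOURCE A (Python) =====
-- def CheckFrameDisruption(orf_start, orf_end, genome_sequence):
--     """
--     Check if the reading frame in sample sequence is disrupted
--
--     orf_start - int, ORF start coordinate in genome
--     orf_end - int, ORF end coordinate in genome
--     genome_sequence - str, sample genome sequence
--
--     Returns:
--     frame_disrupted - bool, True is frame is disrupted
--     """
--
--     # get ORF sequence
--     ORF_sequence = genome_sequence[orf_start - 1:orf_end]
--
--     if '-' in ORF_sequence:
--         frame_disrupted = False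
--         gap_start, gap_end = None, None
--
--         # scan sequence by codons
--         for i in range(0, len(ORF_sequence), 3):
--
--             codon = ORF_sequence[i:i+3]
--
--             for j, b in enumerate(codon):
--                 if b == '-':
--                     if gap_start is None:
--                         gap_start = j
--                     gap_end = j
--                 else:
--                     if not gap_start is None:
--                         if not (gap_start, gap_end) in [(0, 2), (1, 0), (2, 1)]:
--                             frame_disrupted = True
--                             return frame_disrupted
--                         gap_start, gap_end = None, None
--     else:
--         frame_disrupted = False
--
--     return frame_disrupted
-- ===== SOURCE B (Python) =====
-- def CheckFrameDisruption(orf_start, orf_end, genome_sequence):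
--     """
--     Check if the reading frame in sample sequence is disrupted.
--
--     Single pass over the ORF slice with a running gap-run counter:
--     a maximal run of '-' that is followed by a non-gap character
--     disrupts the frame iff its length is not a multiple of 3.
--     A trailing gap run is never checked.
--     """
--     ORF_sequence = genome_sequence[orf_start - 1:orf_end]
--     run = 0
--     for ch in ORF_sequence:
--         if ch == '-':
--             run += 1
--         else:
--             if run % 3 != 0:
--                 return True
--             run = 0
--     return False
-- ===== Notes on version B (the rewrite author's own statement) =====
-- stated objective: simpler
-- what changed: Replaced the codon-by-codon scan that tracks gap start/end positions within codons against an allowed-pair table by a single character pass with a running gap-run counter, flagging disruption when a completed run's length is not a multiple of 3.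
import Mathlib
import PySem

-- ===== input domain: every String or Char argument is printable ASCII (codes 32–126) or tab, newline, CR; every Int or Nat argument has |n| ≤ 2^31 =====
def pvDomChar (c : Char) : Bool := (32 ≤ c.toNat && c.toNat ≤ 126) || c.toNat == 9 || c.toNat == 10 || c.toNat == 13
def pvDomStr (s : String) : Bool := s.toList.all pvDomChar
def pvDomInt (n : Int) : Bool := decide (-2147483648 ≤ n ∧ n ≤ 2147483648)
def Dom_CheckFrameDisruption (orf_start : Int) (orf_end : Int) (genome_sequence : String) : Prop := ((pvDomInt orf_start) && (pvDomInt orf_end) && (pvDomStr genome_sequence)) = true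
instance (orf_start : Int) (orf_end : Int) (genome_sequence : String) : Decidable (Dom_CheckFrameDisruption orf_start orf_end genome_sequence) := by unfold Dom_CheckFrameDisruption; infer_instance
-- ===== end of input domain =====

-- B replaces A's codon-by-codon gap-position tracking by a single pass with a
-- running gap-run counter (a completed run disrupts iff its length % 3 ≠ 0); simpler, same cost.


-- ===== PORT A =====
-- inner loop 'for j, b in enumerate(codon)': none = the early 'return True' was taken,
-- some (gs, ge) = the updated (gap_start, gap_end) state
def cfdInner : List (Int × Char) → Option Int → Option Int → Option (Option Int × Option Int)
  | [], gs, ge => some (gs, ge)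
  | (j, b) :: rest, gs, ge =>
    if b = '-' then
      cfdInner rest (if gs = none then some j else gs) (some j)
    else
      if gs ≠ none then
        if (gs, ge) ∈ [((some 0 : Option Int), (some 2 : Option Int)), (some 1, some 0), (some 2, some 1)] then
          cfdInner rest none none
        else none
      else cfdInner rest gs ge

-- outer loop 'for i in range(0, len(ORF_sequence), 3)'
def cfdOuter (orf : List Char) : List Int → Option Int → Option Int → Bool
  | [], _, _ => false
  | i :: rest, gs, ge =>
    let codon := PySem.List.slice orf (some i) (some (i + 3))
    match cfdInner (PySem.List.enumerate codon) gs ge with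
    | none => true
    | some (gs', ge') => cfdOuter orf rest gs' ge'

def CheckFrameDisruption (orf_start : Int) (orf_end : Int) (genome_sequence : String) : Bool :=
  let ORF_sequence := PySem.List.slice genome_sequence.toList (some (orf_start - 1)) (some orf_end)
  if '-' ∈ ORF_sequence then
    cfdOuter ORF_sequence (PySem.List.pyRange 0 (ORF_sequence.length : Int) 3) none none
  else
    false

-- ===== PORT B =====
-- 'for ch in ORF_sequence' with the running gap-run counter
def cfdAltLoop : List Char → Nat → Bool
  | [], _ => false
  | c :: rest, run =>
    if c = '-' then cfdAltLoop rest (run + 1)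
    else if run % 3 ≠ 0 then true
    else cfdAltLoop rest 0

def CheckFrameDisruption_alt (orf_start : Int) (orf_end : Int) (genome_sequence : String) : Bool :=
  let ORF_sequence := PySem.List.slice genome_sequence.toList (some (orf_start - 1)) (some orf_end)
  cfdAltLoop ORF_sequence 0

-- ===== PRECONDITION & SPEC =====
def Spec_CheckFrameDisruption (orf_start : Int) (orf_end : Int) (genome_sequence : String) (out : Bool) : Prop := out = CheckFrameDisruption_alt orf_start orf_end genome_sequence
instance (orf_start : Int) (orf_end : Int) (genome_sequence : String) (out : Bool) : Decidable (Spec_CheckFrameDisruption orf_start orf_end genome_sequence out) := by unfold Spec_CheckFrameDisruption; infer_instance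

-- ===== CLAIM (what is proved, stated in full; the proofs are below) =====
def Claim_equal_CheckFrameDisruption : Prop := ∀ (orf_start : Int) (orf_end : Int) (genome_sequence : String), Dom_CheckFrameDisruption orf_start orf_end genome_sequence → Spec_CheckFrameDisruption orf_start orf_end genome_sequence (CheckFrameDisruption orf_start orf_end genome_sequence)

-- ===== LEMMAS AND PROOFS =====

-- A's scan flattened to one pass over the characters, carrying the in-codon index j (cycling 0,1,2)
def cfdFlat : List Char → Int → Option Int → Option Int → Bool
  | [], _, _, _ => false
  | c :: rest, j, gs, ge =>
    if c = '-' then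
      cfdFlat rest ((j + 1) % 3) (if gs = none then some j else gs) (some j)
    else
      if gs ≠ none then
        if (gs, ge) ∈ [((some 0 : Option Int), (some 2 : Option Int)), (some 1, some 0), (some 2, some 1)] then
          cfdFlat rest ((j + 1) % 3) none none
        else true
      else cfdFlat rest ((j + 1) % 3) gs ge

lemma pyRange3_nil (a b : Int) (h : b ≤ a) : PySem.List.pyRange a b 3 = [] := by
  rw [PySem.List.pyRange_of_pos a b (by norm_num)]
  simp [show ¬ a < b by omega]

lemma pyRange3_cons (a b : Int) (h : a < b) : PySem.List.pyRange a b 3 = a :: PySem.List.pyRange (a + 3) b 3 := by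
  rw [PySem.List.pyRange_of_pos a b (by norm_num), PySem.List.pyRange_of_pos (a + 3) b (by norm_num)]
  by_cases h3 : a + 3 < b
  · have hc : ((b - a + 3 - 1) / 3).toNat = ((b - (a + 3) + 3 - 1) / 3).toNat + 1 := by omega
    simp only [if_pos h, if_pos h3, hc, List.range_succ_eq_map, List.map_cons, List.map_map]
    congr 1
    · norm_num
    · apply List.map_congr_left; intro k _; simp only [Function.comp]; push_cast; ring
  · have hc : ((b - a + 3 - 1) / 3).toNat = 1 := by omega
    simp [if_pos h, if_neg h3, hc, List.range_succ]

-- one outer iteration on a full codon [a,b,c] equals three flat steps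
lemma flat_step3 (a b c : Char) (t : List Char) (gs ge : Option Int) :
    cfdFlat (a :: b :: c :: t) 0 gs ge =
      match cfdInner (PySem.List.enumerate [a, b, c]) gs ge with
      | none => true
      | some (gs', ge') => cfdFlat t 0 gs' ge' := by
  simp only [PySem.List.enumerate_cons, PySem.List.enumerate_nil, cfdInner, cfdFlat]
  norm_num
  split_ifs <;> simp_all <;> tauto

-- a short final codon (1 or 2 chars): flat finishes, inner state is discarded
lemma flat_step1 (a : Char) (gs ge : Option Int) :
    cfdFlat [a] 0 gs ge =
      match cfdInner (PySem.List.enumerate [a]) gs ge with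
      | none => true
      | some _ => false := by
  simp only [PySem.List.enumerate_cons, PySem.List.enumerate_nil, cfdInner, cfdFlat]
  split_ifs <;> simp_all

lemma flat_step2 (a b : Char) (gs ge : Option Int) :
    cfdFlat [a, b] 0 gs ge =
      match cfdInner (PySem.List.enumerate [a, b]) gs ge with
      | none => true
      | some _ => false := by
  simp only [PySem.List.enumerate_cons, PySem.List.enumerate_nil, cfdInner, cfdFlat]
  norm_num
  split_ifs <;> simp_all <;> tauto

-- A's outer codon loop from offset 3*k equals the flat scan of the remaining characters
lemma outer_eq_flat (orf : List Char) : ∀ (k : Nat) (gs ge : Option Int),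
    cfdOuter orf (PySem.List.pyRange (3 * (k : Int)) (orf.length : Int) 3) gs ge =
      cfdFlat (orf.drop (3 * k)) 0 gs ge := by
  intro k
  induction hm : orf.length - 3 * k using Nat.strong_induction_on generalizing k with
  | _ m ih =>
  intro gs ge
  by_cases hlt : 3 * k < orf.length
  · rw [pyRange3_cons _ _ (by exact_mod_cast hlt)]
    have hsl : PySem.List.slice orf (some (3 * (k : Int))) (some (3 * (k : Int) + 3)) =
        (orf.drop (3 * k)).take 3 := by
      have := PySem.List.slice_natCast_add orf (3 * k) 3
      simpa using this
    have hdd : orf.drop (3 * k) ≠ [] := by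
      intro h; rw [List.drop_eq_nil_iff] at h; omega
    simp only [cfdOuter, hsl]
    have hnext : (3 * (k : Int) + 3) = 3 * ((k + 1 : Nat) : Int) := by push_cast; ring
    rcases hd : orf.drop (3 * k) with _ | ⟨a, tl⟩
    · exact absurd hd hdd
    rcases tl with _ | ⟨b, tl2⟩
    · -- one char left: drop (3*(k+1)) = [], next range empty
      have hlen : orf.length = 3 * k + 1 := by
        have := congrArg List.length hd
        simp [List.length_drop] at this; omega
      rw [hnext]
      rw [show PySem.List.pyRange (3 * ((k + 1 : Nat) : Int)) (orf.length : Int) 3 = [] from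
        pyRange3_nil _ _ (by push_cast; omega)]
      have := flat_step1 a gs ge
      simp only [List.take, flat_step1 a gs ge]
      cases cfdInner (PySem.List.enumerate [a]) gs ge with
      | none => rfl
      | some s => cases s; simp [cfdOuter]
    rcases tl2 with _ | ⟨c, tl3⟩
    · have hlen : orf.length = 3 * k + 2 := by
        have := congrArg List.length hd
        simp [List.length_drop] at this; omega
      rw [hnext]
      rw [show PySem.List.pyRange (3 * ((k + 1 : Nat) : Int)) (orf.length : Int) 3 = [] from
        pyRange3_nil _ _ (by push_cast; omega)]
      simp only [List.take, flat_step2 a b gs ge]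
      cases cfdInner (PySem.List.enumerate [a, b]) gs ge with
      | none => rfl
      | some s => cases s; simp [cfdOuter]
    · -- full codon
      have hdrop3 : orf.drop (3 * (k + 1)) = tl3 := by
        have : orf.drop (3 * (k+1)) = (orf.drop (3 * k)).drop 3 := by
          rw [List.drop_drop]; ring_nf
        rw [this, hd]; rfl
      rw [hnext]
      simp only [List.take, flat_step3 a b c tl3 gs ge]
      cases hinner : cfdInner (PySem.List.enumerate [a, b, c]) gs ge with
      | none => rfl
      | some s =>
        cases s with
        | mk gs' ge' =>
          have hlen : orf.length - 3 * (k + 1) < m := by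
            have := congrArg List.length hd
            simp [List.length_drop] at this; omega
          rw [← hdrop3]
          exact ih _ hlen (k + 1) rfl gs' ge'
  · rw [pyRange3_nil _ _ (by exact_mod_cast Nat.le_of_not_lt hlt)]
    rw [List.drop_eq_nil_iff.mpr (by omega)]
    rfl

-- invariant tying A's (gap_start, gap_end) state at in-codon index j to B's run counter r
def CFDInv (j : Int) (gs ge : Option Int) (r : Nat) : Prop :=
  (r = 0 ∧ gs = none ∧ ge = none) ∨
  (0 < r ∧ ∃ g : Int, gs = some g ∧ 0 ≤ g ∧ g < 3 ∧ (g + (r : Int)) % 3 = j ∧ ge = some ((j + 2) % 3))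

lemma flat_eq_alt : ∀ (l : List Char) (j : Int) (gs ge : Option Int) (r : Nat),
    0 ≤ j → j < 3 → CFDInv j gs ge r → cfdFlat l j gs ge = cfdAltLoop l r := by
  intro l
  induction l with
  | nil => intro _ _ _ _ _ _ _; rfl
  | cons c rest ih =>
    intro j gs ge r hj0 hj3 hinv
    by_cases hc : c = '-'
    · simp only [cfdFlat, cfdAltLoop, if_pos hc]
      rcases hinv with ⟨hr, hgs, hge⟩ | ⟨hr, g, hgs, hg0, hg3, hmod, hge⟩
      · subst hgs
        refine ih ((j + 1) % 3) (some j) (some j) (r + 1) (by omega) (by omega) ?_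
        right
        exact ⟨by omega, j, rfl, hj0, hj3, by omega, by congr 1; omega⟩
      · subst hgs
        rw [if_neg (by simp)]
        refine ih ((j + 1) % 3) (some g) (some j) (r + 1) (by omega) (by omega) ?_
        right
        exact ⟨by omega, g, rfl, hg0, hg3, by push_cast at hmod ⊢; omega, by congr 1; omega⟩
    · simp only [cfdFlat, cfdAltLoop, if_neg hc]
      rcases hinv with ⟨hr, hgs, hge⟩ | ⟨hr, g, hgs, hg0, hg3, hmod, hge⟩
      · subst hgs; subst hge; subst hr
        rw [if_neg (by simp : ¬((none : Option Int) ≠ none)), if_neg (by norm_num : ¬(0 % 3 ≠ 0))]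
        exact ih ((j + 1) % 3) none none 0 (by omega) (by omega) (Or.inl ⟨rfl, rfl, rfl⟩)
      · subst hgs; subst hge
        rw [if_pos (by simp)]
        have hmem : ((some g : Option Int), (some ((j + 2) % 3) : Option Int)) ∈
            [((some 0 : Option Int), (some 2 : Option Int)), (some 1, some 0), (some 2, some 1)] ↔
            r % 3 = 0 := by
          simp only [List.mem_cons, Prod.mk.injEq, Option.some.injEq,
            List.not_mem_nil, or_false]
          constructor
          · rintro (⟨hg, he⟩ | ⟨hg, he⟩ | ⟨hg, he⟩) <;> omega
          · intro h0; omega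
        by_cases hm : r % 3 = 0
        · rw [if_pos (hmem.mpr hm), if_neg (by omega)]
          exact ih ((j + 1) % 3) none none 0 (by omega) (by omega) (Or.inl ⟨rfl, rfl, rfl⟩)
        · rw [if_neg (fun h => hm (hmem.mp h)), if_pos (by omega)]

lemma alt_false_of_no_gap : ∀ (l : List Char), '-' ∉ l → cfdAltLoop l 0 = false := by
  intro l
  induction l with
  | nil => intro _; rfl
  | cons c rest ih =>
    intro h
    simp only [List.mem_cons, not_or] at h
    simp only [cfdAltLoop, if_neg (Ne.symm h.1)]
    norm_num
    exact ih h.2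

-- ===== VERDICT (by name: the statement is the Claim_ definition above) =====
lemma cfd_main_list (orf : List Char) :
    (if '-' ∈ orf then cfdOuter orf (PySem.List.pyRange 0 (orf.length : Int) 3) none none else false) =
      cfdAltLoop orf 0 := by
  by_cases hmem : '-' ∈ orf
  · rw [if_pos hmem]
    have h0 := outer_eq_flat orf 0 none none
    simp only [Nat.cast_zero, mul_zero, List.drop_zero] at h0
    rw [h0]
    exact flat_eq_alt orf 0 none none 0 (by norm_num) (by norm_num) (Or.inl ⟨rfl, rfl, rfl⟩)
  · rw [if_neg hmem, alt_false_of_no_gap orf hmem]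

-- ===== VERDICT2 =====
theorem CheckFrameDisruption_spec : Claim_equal_CheckFrameDisruption := by
  intro orf_start orf_end genome_sequence _
  exact cfd_main_list (PySem.List.slice genome_sequence.toList (some (orf_start - 1)) (some orf_end))
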